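-- pv_equiv track=rewrite | github.com/nsuberi/gfw-api | gfw/forestchange/loss_by_type.py | _aggregate_histogram_by_type
-- ===== SOURCE A (Python) =====
-- LABELS = ["Agriculture", "Mixed agriculture and forest",
--     "Open broadleaved forest", "Closed broadleaved forest",
--     "Open needleleaved forest", "Closed needleleaved forest",
--     "Open mixed forest", "Mixed forest and grassland",
--     "Grassland / shrub", "Flooded forest", "Wetland", "Settlements",
--     "Bare land", "Water bodies", "Snow / ice", "No data"]
--
-- def _aggregate_histogram_by_type(period, histogram):
--     """Groups the given histogram value by land type"""
--
--     types = {}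
--
--     if histogram is not None:
--         values = histogram['counts']
--         offset = len(LABELS)
--         label_range = enumerate(range(0, len(LABELS)-1))
--
--         group_by_type = lambda i: dict(zip(LABELS, values[offset*i:offset*i+offset]))
--         values_by_type = [group_by_type(i) for i, label in label_range]
--         types = {key: sum(d.get(key, 0) for d in values_by_type) for key in values_by_type[0]}
--
--     return types
-- ===== SOURCE B (Python) =====
-- LABELS = ["Agriculture", "Mixed agriculture and forest",
--     "Open broadleaved forest", "Closed broadleaved forest",
--     "Open needleleaved forest", "Closed needleleaved forest",
--     "Open mixed forest", "Mixed forest and grassland",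
--     "Grassland / shrub", "Flooded forest", "Wetland", "Settlements",
--     "Bare land", "Water bodies", "Snow / ice", "No data"]
--
--
-- def _aggregate_histogram_by_type(period, histogram):
--     """Groups the given histogram value by land type."""
--     if histogram is None:
--         return {}
--     values = histogram['counts']
--     width = len(LABELS)
--     totals = {}
--     for group in range(len(LABELS) - 1):
--         chunk = values[width * group : width * group + width]
--         for label, count in zip(LABELS, chunk):
--             totals[label] = totals.get(label, 0) + count
--     return totals
-- ===== Notes on version B (the rewrite author's own statement) =====
-- stated objective: simpler
-- what changed: B replaces A's group-major construction of 15 intermediate zip-dicts followed by a per-key sum comprehension with a single streaming accumulation into one totals dict (totals[label] = totals.get(label, 0) + count over each group's chunk); Pre_ excludes only histograms without a 'counts' key, where both raise KeyError.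
import Mathlib
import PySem

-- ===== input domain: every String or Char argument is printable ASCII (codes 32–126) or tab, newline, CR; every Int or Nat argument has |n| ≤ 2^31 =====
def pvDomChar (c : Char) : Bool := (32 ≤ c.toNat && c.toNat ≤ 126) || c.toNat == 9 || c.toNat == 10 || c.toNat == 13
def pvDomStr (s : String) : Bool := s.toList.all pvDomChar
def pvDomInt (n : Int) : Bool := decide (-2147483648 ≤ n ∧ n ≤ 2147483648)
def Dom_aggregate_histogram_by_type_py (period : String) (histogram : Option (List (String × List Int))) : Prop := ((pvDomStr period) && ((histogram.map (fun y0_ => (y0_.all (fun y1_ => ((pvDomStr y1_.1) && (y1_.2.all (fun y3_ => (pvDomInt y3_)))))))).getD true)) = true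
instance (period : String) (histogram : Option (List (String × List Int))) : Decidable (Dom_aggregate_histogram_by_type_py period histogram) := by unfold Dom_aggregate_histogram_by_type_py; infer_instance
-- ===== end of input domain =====

-- B replaces A's build of 15 intermediate zip-dicts followed by a per-key sum with a
-- single streaming accumulation into one totals dict (simpler); same return value.

-- the module constant LABELS (16 land-type names)
def pvLABELS : List String := ["Agriculture", "Mixed agriculture and forest",
    "Open broadleaved forest", "Closed broadleaved forest",
    "Open needleleaved forest", "Closed needleleaved forest",
    "Open mixed forest", "Mixed forest and grassland",
    "Grassland / shrub", "Flooded forest", "Wetland", "Settlements",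
    "Bare land", "Water bodies", "Snow / ice", "No data"]

-- ===== PORT A =====
-- literal port of _aggregate_histogram_by_type: build the 15 group dicts
-- dict(zip(LABELS, values[offset*i : offset*i+offset])) (a zip of nodup keys; first-match
-- lookup = dict lookup), then {key: sum(d.get(key, 0) for d in values_by_type) for key in
-- values_by_type[0]}. histogram['counts'] is association-list lookup; where Python raises
-- KeyError the port returns [] — those inputs are excluded by Pre_.
def aggregate_histogram_by_type_py (period : String) (histogram : Option (List (String × List Int))) : List (String × Int) :=
  match histogram with
  | none => []
  | some h =>
    match h.lookup "counts" with
    | none => []  -- Python: KeyError (outside Pre_)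
    | some values =>
      let offset := pvLABELS.length
      let group_by_type := fun (i : Nat) =>
        pvLABELS.zip (PySem.List.slice values (some ((offset * i : Nat) : Int)) (some ((offset * i + offset : Nat) : Int)))
      let values_by_type := (List.range (pvLABELS.length - 1)).map group_by_type
      ((values_by_type.headD []).map Prod.fst).map
        (fun key => (key, (values_by_type.map (fun d => ((d.lookup key).getD 0))).sum))

-- ===== PORT B =====
-- literal port of Source B: one totals dict (PySem.Dict, insertion order), accumulated over
-- the groups: for each group, zip LABELS with the group's chunk and add each count into
-- totals via totals[label] = totals.get(label, 0) + count.
def aggregate_histogram_by_type_py_alt (period : String) (histogram : Option (List (String × List Int))) : List (String × Int) :=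
  match histogram with
  | none => []
  | some h =>
    match h.lookup "counts" with
    | none => []  -- Python: KeyError (outside Pre_)
    | some values =>
      let width := pvLABELS.length
      ((List.range (pvLABELS.length - 1)).foldl
        (fun totals group =>
          let chunk := PySem.List.slice values (some ((width * group : Nat) : Int)) (some ((width * group + width : Nat) : Int))
          (pvLABELS.zip chunk).foldl
            (fun t p => t.insert p.1 (t.getD p.1 0 + p.2)) totals)
        PySem.Dict.empty).items

-- ===== PRECONDITION & SPEC =====
-- Pre_ excludes exactly the inputs where both Pythons raise KeyError: a present
-- histogram dict that has no key 'counts'.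
def Pre_aggregate_histogram_by_type_py (period : String) (histogram : Option (List (String × List Int))) : Prop :=
  (histogram.elim true (fun h => h.any (fun p => p.1 == "counts"))) = true
instance (period : String) (histogram : Option (List (String × List Int))) : Decidable (Pre_aggregate_histogram_by_type_py period histogram) := by unfold Pre_aggregate_histogram_by_type_py; infer_instance

def pvWitness_aggregate_histogram_by_type_py : String × (Option (List (String × List Int))) :=
  ("2001,2010", some [("counts", [3, 1, 4, 1, 5, 9, 2, 6])])

def Spec_aggregate_histogram_by_type_py (period : String) (histogram : Option (List (String × List Int))) (out : List (String × Int)) : Prop := out = aggregate_histogram_by_type_py_alt period histogram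
instance (period : String) (histogram : Option (List (String × List Int))) (out : List (String × Int)) : Decidable (Spec_aggregate_histogram_by_type_py period histogram out) := by unfold Spec_aggregate_histogram_by_type_py; infer_instance

-- ===== CLAIM (what is proved, stated in full; the proofs are below) =====
def Claim_equal_aggregate_histogram_by_type_py : Prop := ∀ (period : String) (histogram : Option (List (String × List Int))), Dom_aggregate_histogram_by_type_py period histogram → Pre_aggregate_histogram_by_type_py period histogram → Spec_aggregate_histogram_by_type_py period histogram (aggregate_histogram_by_type_py period histogram)

-- ===== LEMMAS AND PROOFS =====

theorem pv_labels_nodup : pvLABELS.Nodup := by decide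

-- first-match lookup of ks[j] in zip ks vs, for nodup keys, reads vs at position j
theorem pv_lookup_zip_getD (ks : List String) (vs : List Int) (j : Nat)
    (hnd : ks.Nodup) (hj : j < ks.length) :
    (((ks.zip vs).lookup ks[j]).getD 0) = vs.getD j 0 := by
  induction ks generalizing vs j with
  | nil => simp at hj
  | cons k ks ih =>
    cases vs with
    | nil => simp
    | cons v vs =>
      cases j with
      | zero => simp
      | succ j =>
        have hj' : j < ks.length := by simpa using hj
        have hne : (ks[j] == k) = false := by
          simp only [List.nodup_cons] at hnd
          have : ks[j] ∈ ks := List.getElem_mem hj'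
          simp
          intro he; exact hnd.1 (he ▸ this)
        simp only [List.getElem_cons_succ, List.zip_cons_cons, List.lookup_cons, hne]
        exact ih vs j hnd.of_cons hj'

-- the keys of zip ks vs are the first (length vs) keys
theorem pv_map_fst_zip (as : List String) (bs : List Int) :
    (as.zip bs).map Prod.fst = as.take bs.length := by
  induction as generalizing bs with
  | nil => simp
  | cons a as ih => cases bs with
    | nil => simp
    | cons b bs => simp [ih]

-- a prefix of length n ≤ length is the range-indexed map
theorem pv_take_eq_map_range (L : List String) (n : Nat) (h : n ≤ L.length) :
    L.take n = (List.range n).map (fun j => L.getD j "") := by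
  apply List.ext_getElem
  · simp [Nat.min_eq_left h]
  · intro i h1 h2
    simp only [List.length_take] at h1
    simp [List.getD_eq_getElem?_getD, List.getElem?_eq_getElem (lt_of_lt_of_le (lt_min_iff.mp h1).1 h)]

-- A's per-group contribution for label j is a direct read of values at 16*i+j
theorem pv_colA (values : List Int) (j : Nat) (hj : j < 16) (i : Nat) :
    (((pvLABELS.zip (PySem.List.slice values (some ((16*i : Nat):Int)) (some ((16*i+16 : Nat):Int)))).lookup (pvLABELS.getD j "")).getD 0)
      = values.getD (16*i+j) 0 := by
  have hlen : pvLABELS.length = 16 := rfl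
  have hkey : pvLABELS.getD j "" = pvLABELS[j]'(by omega) := List.getD_eq_getElem _ _ (by omega)
  rw [hkey, PySem.List.slice_natCast,
      pv_lookup_zip_getD pvLABELS _ j pv_labels_nodup (by omega)]
  have h16 : 16*i+16 - 16*i = 16 := by omega
  rw [h16]
  simp only [List.getD_eq_getElem?_getD, List.getElem?_take_of_lt hj, List.getElem?_drop]

-- if any key is 'counts', the first-match lookup succeeds
theorem pv_lookup_some (h : List (String × List Int))
    (hp : h.any (fun p => p.1 == "counts") = true) :
    (List.lookup "counts" h).isSome = true := by
  induction h with
  | nil => simp at hp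
  | cons x t ih =>
    obtain ⟨k, v⟩ := x
    by_cases hk : k = "counts"
    · subst hk; simp
    · have hf : (k == "counts") = false := by simp [hk]
      simp only [List.any_cons, hf, Bool.false_or] at hp
      have hf' : ("counts" == k) = false := by simp [Ne.symm hk]
      simp only [List.lookup_cons, hf']
      exact ih hp

-- the core value-level fact: A's body equals the label-major closed form
theorem pv_core (values : List Int) :
    (((List.range 15).map (fun i =>
        pvLABELS.zip (PySem.List.slice values (some ((16 * i : Nat) : Int))
          (some ((16 * i + 16 : Nat) : Int))))).headD [] |>.map Prod.fst).map
      (fun key => (key, (((List.range 15).map (fun i =>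
        pvLABELS.zip (PySem.List.slice values (some ((16 * i : Nat) : Int))
          (some ((16 * i + 16 : Nat) : Int))))).map
            (fun d => ((d.lookup key).getD 0))).sum))
    = (List.range (min 16 values.length)).map (fun j =>
        (pvLABELS.getD j "",
         (((List.range 15).map (fun i => values.getD (16 * i + j) 0)).sum)))
    := by
  have h15 : List.range 15 = 0 :: List.range' 1 14 := by decide
  have hch : PySem.List.slice values (some ((16 * 0 : Nat) : Int)) (some ((16 * 0 + 16 : Nat) : Int))
      = values.take 16 := by
    rw [PySem.List.slice_natCast]; norm_num
  have hhead : ((List.range 15).map (fun i =>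
      pvLABELS.zip (PySem.List.slice values (some ((16 * i : Nat) : Int))
        (some ((16 * i + 16 : Nat) : Int))))).headD []
      = pvLABELS.zip (values.take 16) := by
    rw [h15, List.map_cons, List.headD_cons, hch]
  rw [hhead, pv_map_fst_zip, List.length_take,
      pv_take_eq_map_range pvLABELS _ (by have : pvLABELS.length = 16 := rfl; omega),
      List.map_map]
  apply List.map_congr_left
  intro j hj
  have hj16 : j < 16 := by have := List.mem_range.mp hj; omega
  simp only [Function.comp_apply, Prod.mk.injEq, true_and]
  rw [List.map_map]
  apply congrArg List.sum
  apply List.map_congr_left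
  intro i _
  simp only [Function.comp_apply]
  exact pv_colA values j hj16 i

-- lookup misses a key that is not among the firsts
theorem pv_lookup_eq_none (ps : List (String × Int)) (k : String)
    (hk : k ∉ ps.map Prod.fst) : ps.lookup k = none := by
  induction ps with
  | nil => rfl
  | cons p ps ih =>
    obtain ⟨a, b⟩ := p
    simp only [List.map_cons, List.mem_cons, not_or] at hk
    have hne : (k == a) = false := by simp [hk.1]
    simp only [List.lookup_cons, hne]
    exact ih hk.2

-- B's inner loop, pointwise: folding a nodup-key pair list into totals adds
-- each key's value once (first-match lookup) and leaves other keys alone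
theorem pv_inner_getD (ps : List (String × Int)) (t : PySem.Dict String Int) (k : String)
    (hnd : (ps.map Prod.fst).Nodup) :
    ((ps.foldl (fun t p => t.insert p.1 (t.getD p.1 0 + p.2)) t).getD k 0)
      = t.getD k 0 + ((ps.lookup k).getD 0) := by
  induction ps generalizing t with
  | nil => simp
  | cons p ps ih =>
    obtain ⟨a, b⟩ := p
    simp only [List.map_cons, List.nodup_cons] at hnd
    simp only [List.foldl_cons, List.lookup_cons]
    by_cases hk : k = a
    · subst hk
      rw [ih _ hnd.2, pv_lookup_eq_none ps k hnd.1,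
          PySem.Dict.getD_insert_self]
      simp
    · have : (k == a) = false := by simp [hk]
      rw [ih _ hnd.2, PySem.Dict.getD_insert_of_ne _ _ _ hk, this]

-- updating a set with elements it already contains is a no-op
theorem pv_update_subset (s : PySem.Set String) (xs : List String)
    (hx : ∀ x ∈ xs, x ∈ s) : PySem.Set.update s xs = s := by
  induction xs generalizing s with
  | nil => rfl
  | cons x xs ih =>
    have hmem : x ∈ s := hx x (by simp)
    have hadd : PySem.Set.add s x = s := by
      simp [PySem.Set.add, PySem.Set.contains, hmem]
    show PySem.Set.update (PySem.Set.add s x) xs = s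
    rw [hadd]
    exact ih s (fun y hy => hx y (by simp [hy]))

-- updating a set with fresh distinct elements appends them
theorem pv_update_fresh (s : PySem.Set String) (xs : List String)
    (hnd : xs.Nodup) (hfr : ∀ x ∈ xs, x ∉ s) : PySem.Set.update s xs = s ++ xs := by
  induction xs generalizing s with
  | nil => simp [PySem.Set.update]
  | cons x xs ih =>
    simp only [List.nodup_cons] at hnd
    have hadd : PySem.Set.add s x = s ++ [x] := by
      have : x ∉ s := hfr x (by simp)
      simp [PySem.Set.add, PySem.Set.contains, this]
    show PySem.Set.update (PySem.Set.add s x) xs = s ++ x :: xs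
    rw [hadd, ih (s ++ [x]) hnd.2 ?_]
    · simp
    · intro y hy
      simp only [List.mem_append, List.mem_singleton, not_or]
      exact ⟨hfr y (by simp [hy]), fun he => hnd.1 (he ▸ hy)⟩

-- ofList of a nodup list is the list itself
theorem pv_ofList_nodup (xs : List String) (h : xs.Nodup) :
    PySem.Set.ofList xs = xs := by
  rw [PySem.Set.ofList_eq_foldl]
  have : List.foldl PySem.Set.add [] xs = PySem.Set.update [] xs := rfl
  rw [this, pv_update_fresh [] xs h (by simp)]
  simp

-- nodup prefixes of LABELS
theorem pv_take_nodup (m : Nat) : (pvLABELS.take m).Nodup :=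
  (List.take_sublist m pvLABELS).nodup pv_labels_nodup

-- membership is monotone along prefixes
theorem pv_mem_take_mono {m n : Nat} (h : m ≤ n) {x : String}
    (hx : x ∈ pvLABELS.take m) : x ∈ pvLABELS.take n := by
  have : pvLABELS.take m = (pvLABELS.take n).take m := by
    rw [List.take_take, Nat.min_eq_left h]
  rw [this] at hx
  exact (List.take_sublist m (pvLABELS.take n)).mem hx

-- B's loop body over one group, as a named step function (proof-only helper)
def pvStep (values : List Int) (totals : PySem.Dict String Int) (group : Nat) : PySem.Dict String Int :=
  (pvLABELS.zip (PySem.List.slice values (some ((16*group : Nat):Int)) (some ((16*group+16 : Nat):Int)))).foldl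
    (fun t p => t.insert p.1 (t.getD p.1 0 + p.2)) totals

-- the zipped keys of any group are nodup
theorem pv_zip_fst_nodup (values : List Int) (g : Nat) :
    (((pvLABELS.zip (PySem.List.slice values (some ((16*g : Nat):Int)) (some ((16*g+16 : Nat):Int)))).map Prod.fst)).Nodup := by
  rw [pv_map_fst_zip]
  exact pv_take_nodup _

-- one step adds the group's contribution to label j
theorem pv_step_getD (values : List Int) (t : PySem.Dict String Int) (g j : Nat) (hj : j < 16) :
    (pvStep values t g).getD (pvLABELS.getD j "") 0
      = t.getD (pvLABELS.getD j "") 0 + values.getD (16*g+j) 0 := by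
  unfold pvStep
  rw [pv_inner_getD _ _ _ (pv_zip_fst_nodup values g), pv_colA values j hj g]

-- folding any list of groups adds each group's contribution
theorem pv_outer_getD (values : List Int) (gs : List Nat) (t : PySem.Dict String Int)
    (j : Nat) (hj : j < 16) :
    ((gs.foldl (pvStep values) t).getD (pvLABELS.getD j "") 0)
      = t.getD (pvLABELS.getD j "") 0 + (gs.map (fun g => values.getD (16*g+j) 0)).sum := by
  induction gs generalizing t with
  | nil => simp
  | cons g gs ih =>
    rw [List.foldl_cons, ih, pv_step_getD values t g j hj]
    simp only [List.map_cons, List.sum_cons]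
    omega

-- the chunk of group g has at most min 16 len labels
theorem pv_chunk_len_le (values : List Int) (g : Nat) :
    (PySem.List.slice values (some ((16*g : Nat):Int)) (some ((16*g+16 : Nat):Int))).length
      ≤ min 16 values.length := by
  rw [PySem.List.slice_natCast]
  simp only [List.length_drop, List.length_take]
  omega

-- group 0's chunk covers exactly min 16 len labels
theorem pv_chunk0_len (values : List Int) :
    (PySem.List.slice values (some ((16*0 : Nat):Int)) (some ((16*0+16 : Nat):Int))).length
      = min 16 values.length := by
  rw [PySem.List.slice_natCast]
  simp

-- one step keeps the key list (= the first min 16 len labels) unchanged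
theorem pv_step_keys (values : List Int) (t : PySem.Dict String Int) (g : Nat)
    (ht : t.keys = pvLABELS.take (min 16 values.length)) :
    (pvStep values t g).keys = pvLABELS.take (min 16 values.length) := by
  unfold pvStep
  rw [PySem.Dict.keys_foldl_insert_key, pv_map_fst_zip, ht]
  exact pv_update_subset _ _ (fun x hx => pv_mem_take_mono (pv_chunk_len_le values g) hx)

-- group 0 from the empty dict establishes the key list
theorem pv_keys0 (values : List Int) :
    (pvStep values PySem.Dict.empty 0).keys = pvLABELS.take (min 16 values.length) := by
  unfold pvStep
  rw [PySem.Dict.keys_foldl_insert_key, pv_map_fst_zip, PySem.Dict.keys_empty, pv_chunk0_len]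
  have : PySem.Set.update ([] : PySem.Set String) (pvLABELS.take (min 16 values.length))
      = PySem.Set.ofList (pvLABELS.take (min 16 values.length)) := by
    rw [PySem.Set.ofList_eq_foldl]; rfl
  rw [this, pv_ofList_nodup _ (pv_take_nodup _)]

-- folding any list of groups keeps the key list unchanged
theorem pv_outer_keys (values : List Int) (gs : List Nat) (t : PySem.Dict String Int)
    (ht : t.keys = pvLABELS.take (min 16 values.length)) :
    (gs.foldl (pvStep values) t).keys = pvLABELS.take (min 16 values.length) := by
  induction gs generalizing t with
  | nil => exact ht
  | cons g gs ih => exact ih _ (pv_step_keys values t g ht)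

-- the core value-level fact for B: the fold's items are the label-major closed form
theorem pv_B_core (values : List Int) :
    ((List.range 15).foldl (pvStep values) PySem.Dict.empty).items
      = (List.range (min 16 values.length)).map (fun j =>
          (pvLABELS.getD j "",
           (((List.range 15).map (fun i => values.getD (16 * i + j) 0)).sum))) := by
  have h15 : List.range 15 = 0 :: List.range' 1 14 := by decide
  have hkeys : ((List.range 15).foldl (pvStep values) PySem.Dict.empty).keys
      = pvLABELS.take (min 16 values.length) := by
    rw [h15, List.foldl_cons]
    exact pv_outer_keys values _ _ (pv_keys0 values)
  rw [PySem.Dict.items_eq_map_keys _ (hkeys ▸ pv_take_nodup _) 0, hkeys,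
      pv_take_eq_map_range pvLABELS _ (by have : pvLABELS.length = 16 := rfl; omega),
      List.map_map]
  apply List.map_congr_left
  intro j hj
  have hj16 : j < 16 := by have := List.mem_range.mp hj; omega
  simp only [Function.comp_apply, Prod.mk.injEq, true_and]
  rw [pv_outer_getD values _ _ j hj16, PySem.Dict.getD_empty]
  simp

-- ===== VERDICT (by name: the statement is the Claim_ definition above) =====
theorem aggregate_histogram_by_type_py_spec : Claim_equal_aggregate_histogram_by_type_py := by
  intro period histogram _ hpre
  unfold Spec_aggregate_histogram_by_type_py
  cases histogram with
  | none => rfl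
  | some h =>
    unfold Pre_aggregate_histogram_by_type_py at hpre
    simp only [Option.elim_some] at hpre
    cases hl : h.lookup "counts" with
    | none =>
      exfalso
      have := pv_lookup_some h hpre
      rw [hl] at this
      simp at this
    | some values =>
      simp only [aggregate_histogram_by_type_py, aggregate_histogram_by_type_py_alt, hl]
      exact (pv_core values).trans (pv_B_core values).symm
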